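-- pv_equiv track=rewrite | github.com/freechenh/licode | two_slice_demo/sort_demo.py | xxxx
-- ===== SOURCE A (Python) =====
-- def xxxx(list_):
--     min_ = list_[0]
--     min_index = 0
--     for i in range(0, len(list_)):
--         if list_[i] <= min_:
--             min_ = list_[i]
--             min_index = i
--     return min_, min_index
-- ===== SOURCE B (Python) =====
-- def xxxx(list_):
--     min_ = min(list_)
--     return min_, len(list_) - 1 - list_[::-1].index(min_)
-- ===== Notes on version B (the rewrite author's own statement) =====
-- stated objective: idiomatic
-- what changed: Replaces the fused index loop (running min with <= tie update) by two builtin passes: min() for the value and a reversed-list index() for the last occurrence.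
-- outside the precondition, e.g. on xxxx([]): A raises IndexError, B raises ValueError
import Mathlib
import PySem

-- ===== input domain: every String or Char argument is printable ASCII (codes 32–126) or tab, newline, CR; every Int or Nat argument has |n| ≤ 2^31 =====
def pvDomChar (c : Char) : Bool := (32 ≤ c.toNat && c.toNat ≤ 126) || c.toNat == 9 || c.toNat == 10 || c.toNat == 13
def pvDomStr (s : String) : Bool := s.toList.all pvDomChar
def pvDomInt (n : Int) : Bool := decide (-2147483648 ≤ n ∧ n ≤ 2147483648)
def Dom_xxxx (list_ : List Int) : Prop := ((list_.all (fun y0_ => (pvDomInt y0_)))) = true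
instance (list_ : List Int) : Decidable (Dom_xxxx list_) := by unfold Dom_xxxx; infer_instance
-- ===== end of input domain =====

-- B replaces A's fused index loop by two builtin passes (min(), then a reversed-list index()
-- for the last occurrence); same O(n) cost, more idiomatic.

-- ===== PORT A =====
def xxxx (list_ : List Int) : Int × Int :=
  let min0 := PySem.List.pyGetD list_ 0 0          -- list_[0]; on [] Python raises IndexError (excluded by Pre_)
  (PySem.List.pyRange 0 (list_.length : Int) 1).foldl
    (fun s i => if PySem.List.pyGetD list_ i 0 ≤ s.1 then (PySem.List.pyGetD list_ i 0, i) else s)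
    (min0, 0)

-- ===== PORT B =====
def xxxx_alt (list_ : List Int) : Int × Int :=
  match PySem.List.min? list_ (fun y => y) with
  | none => (0, 0)                                  -- min([]) raises ValueError (excluded by Pre_)
  | some m =>
    let rev := (PySem.List.slice? list_ none none (-1)).getD []   -- list_[::-1]
    (m, (list_.length : Int) - 1 - (((PySem.List.index? rev m).getD 0 : Nat) : Int))

-- ===== PRECONDITION & SPEC =====
-- Pre_ excludes only the empty list, on which A raises IndexError (and B raises ValueError).
def Pre_xxxx (list_ : List Int) : Prop := list_ ≠ []
instance (list_ : List Int) : Decidable (Pre_xxxx list_) := by unfold Pre_xxxx; infer_instance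
def pvWitness_xxxx : List Int := [3, 1, 2, 1]

def Spec_xxxx (list_ : List Int) (out : Int × Int) : Prop := out = xxxx_alt list_
instance (list_ : List Int) (out : Int × Int) : Decidable (Spec_xxxx list_ out) := by unfold Spec_xxxx; infer_instance

-- ===== CLAIM (what is proved, stated in full; the proofs are below) =====
def Claim_equal_xxxx : Prop := ∀ (list_ : List Int), Dom_xxxx list_ → Pre_xxxx list_ → Spec_xxxx list_ (xxxx list_)

-- ===== LEMMAS AND PROOFS =====

-- A on a one-element list.
lemma xxxx_singleton (x : Int) : xxxx [x] = (x, 0) := by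
  simp only [xxxx]
  rw [show (([x] : List Int).length : Int) = 0 + 1 by simp, PySem.List.pyRange_one_singleton]
  simp [PySem.List.pyGetD_zero_cons]

-- B on a one-element list.
lemma xxxx_alt_singleton (x : Int) : xxxx_alt [x] = (x, 0) := by
  simp [xxxx_alt, PySem.List.min?_id_cons, PySem.List.slice?_none_none_neg_one]

-- A's loop on xs ++ [x] is A's loop on xs followed by one more step.
lemma xxxx_snoc (xs : List Int) (x : Int) (h : xs ≠ []) :
    xxxx (xs ++ [x]) =
      (if x ≤ (xxxx xs).1 then (x, (xs.length : Int)) else xxxx xs) := by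
  unfold xxxx
  have hlen : (((xs ++ [x]).length : Nat) : Int) = (xs.length : Int) + 1 := by
    push_cast [List.length_append, List.length_singleton]; omega
  rw [hlen, PySem.List.pyRange_one_succ_right (by positivity), List.foldl_append]
  have hinit : PySem.List.pyGetD (xs ++ [x]) 0 0 = PySem.List.pyGetD xs 0 0 := by
    cases xs with
    | nil => exact absurd rfl h
    | cons a t => simp [PySem.List.pyGetD_zero_cons]
  have hcongr :
      List.foldl
        (fun s i => if PySem.List.pyGetD (xs ++ [x]) i 0 ≤ s.1 then (PySem.List.pyGetD (xs ++ [x]) i 0, i) else s)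
        (PySem.List.pyGetD (xs ++ [x]) 0 0, 0) (PySem.List.pyRange 0 (xs.length : Int) 1) =
      List.foldl
        (fun s i => if PySem.List.pyGetD xs i 0 ≤ s.1 then (PySem.List.pyGetD xs i 0, i) else s)
        (PySem.List.pyGetD xs 0 0, 0) (PySem.List.pyRange 0 (xs.length : Int) 1) := by
    rw [hinit]
    apply PySem.List.foldl_congr_mem
    intro acc i hi
    have hmem := (PySem.List.mem_pyRange_one).1 hi
    have hi' : i.toNat < xs.length := by omega
    have hget : PySem.List.pyGetD (xs ++ [x]) i 0 = PySem.List.pyGetD xs i 0 := by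
      rw [PySem.List.pyGetD_eq_getElem (xs ++ [x]) 0 hmem.1 (by push_cast [List.length_append, List.length_singleton]; omega),
          PySem.List.pyGetD_eq_getElem xs 0 hmem.1 (by omega)]
      exact List.getElem_append_left hi'
    rw [hget]
  rw [hcongr]
  have hx : PySem.List.pyGetD (xs ++ [x]) (xs.length : Int) 0 = x := by
    rw [PySem.List.pyGetD_eq_getElem (xs ++ [x]) 0 (by positivity) (by push_cast [List.length_append, List.length_singleton]; omega)]
    exact List.getElem_concat_length (by simp) _
  simp only [List.foldl, hx]

-- min over xs ++ [x], from min over xs.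
lemma min?_snoc (xs : List Int) (x m : Int)
    (h : PySem.List.min? xs (fun y => y) = some m) :
    PySem.List.min? (xs ++ [x]) (fun y => y) = some (min m x) := by
  cases xs with
  | nil => simp [PySem.List.min?] at h
  | cons a t =>
    rw [PySem.List.min?_id_cons] at h
    rw [List.cons_append, PySem.List.min?_id_cons, List.foldl_append]
    simp_all

-- The main equivalence, by induction on the list from the right.
lemma xxxx_eq_alt : ∀ (l : List Int), l ≠ [] → xxxx l = xxxx_alt l := by
  intro l
  induction l using List.reverseRecOn with
  | nil => intro h; exact absurd rfl h
  | append_singleton xs x ih =>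
    intro _
    cases hxs : xs with
    | nil => simp only [List.nil_append]; rw [xxxx_singleton, xxxx_alt_singleton]
    | cons a t =>
      rw [← hxs]
      have hne : xs ≠ [] := by rw [hxs]; simp
      have hIH := ih hne
      -- B's value on xs
      obtain ⟨m, hm⟩ : ∃ m, PySem.List.min? xs (fun y => y) = some m := by
        cases hmin : PySem.List.min? xs (fun y => y) with
        | none => exact absurd ((PySem.List.min?_eq_none_iff _ _).1 hmin) hne
        | some m => exact ⟨m, rfl⟩
      have hfst : (xxxx xs).1 = m := by
        rw [hIH]; unfold xxxx_alt; rw [hm]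
      rw [xxxx_snoc xs x hne]
      unfold xxxx_alt
      rw [min?_snoc xs x m hm]
      rw [PySem.List.slice?_none_none_neg_one]
      by_cases hx : x ≤ m
      · rw [if_pos (by rw [hfst]; exact hx), min_eq_right hx]
        simp only [List.reverse_append, List.reverse_singleton, List.singleton_append,
                   Option.getD_some]
        rw [PySem.List.index?_cons_self]
        simp only [Option.getD_some]
        refine Prod.ext rfl ?_
        push_cast [List.length_append, List.length_singleton]
        omega
      · rw [if_neg (by rw [hfst]; exact hx)]
        have hminm : min m x = m := min_eq_left (le_of_not_ge hx)
        rw [hminm]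
        have hmem : m ∈ xs.reverse := List.mem_reverse.2 (PySem.List.min?_mem hm)
        obtain ⟨j, hj⟩ := Option.isSome_iff_exists.1 ((PySem.List.index?_isSome_iff _ _).2 hmem)
        have hxm : x ≠ m := fun e => hx (le_of_eq e)
        rw [hIH]; unfold xxxx_alt; rw [hm, PySem.List.slice?_none_none_neg_one]
        simp only [List.reverse_append, List.reverse_singleton, List.singleton_append,
                   Option.getD_some]
        rw [PySem.List.index?_cons_of_ne _ hxm, hj]
        simp only [Option.map_some, Option.getD_some]
        refine Prod.ext rfl ?_
        push_cast [List.length_append, List.length_singleton]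
        omega
  
-- ===== VERDICT (by name: the statement is the Claim_ definition above) =====
theorem xxxx_spec : Claim_equal_xxxx := by
  intro l _ hpre
  unfold Spec_xxxx
  exact xxxx_eq_alt l hpre
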